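-- pv_equiv track=rewrite | github.com/Manishns2007-cyber/TorConsensus | TorConsenus/Tor-Consensus/tor/ftdc_prototype/ftdc/comprehensive_analysis.py | _count_border_crossings
-- ===== SOURCE A (Python) =====
-- from typing import List, Dict, Any, Tuple, Optional
--
-- def _count_border_crossings(nodes: List[Dict]) -> int:
--     """Count number of international border crossings."""
--     if len(nodes) < 2:
--         return 0
--
--     crossings = 0
--     for i in range(len(nodes) - 1):
--         if nodes[i].get('country') != nodes[i + 1].get('country'):
--             crossings += 1
--
--     return crossings
-- ===== SOURCE B (Python) =====
-- def _count_border_crossings(nodes):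
--     """Count number of international border crossings."""
--     cs = [n.get('country') for n in nodes]
--
--     def dc(lo, hi):
--         # crossings within cs[lo:hi], by divide and conquer
--         if hi - lo < 2:
--             return 0
--         mid = (lo + hi) // 2
--         boundary = 1 if cs[mid - 1] != cs[mid] else 0
--         return dc(lo, mid) + dc(mid, hi) + boundary
--
--     return dc(0, len(cs))
-- ===== Notes on version B (the rewrite author's own statement) =====
-- stated objective: alternative
-- what changed: B extracts the country sequence once and counts crossings by divide and conquer: recursively split the index interval at the midpoint, summing crossings of the two halves plus the single boundary comparison, instead of A's linear left-to-right adjacent-pair loop.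
import Mathlib
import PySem

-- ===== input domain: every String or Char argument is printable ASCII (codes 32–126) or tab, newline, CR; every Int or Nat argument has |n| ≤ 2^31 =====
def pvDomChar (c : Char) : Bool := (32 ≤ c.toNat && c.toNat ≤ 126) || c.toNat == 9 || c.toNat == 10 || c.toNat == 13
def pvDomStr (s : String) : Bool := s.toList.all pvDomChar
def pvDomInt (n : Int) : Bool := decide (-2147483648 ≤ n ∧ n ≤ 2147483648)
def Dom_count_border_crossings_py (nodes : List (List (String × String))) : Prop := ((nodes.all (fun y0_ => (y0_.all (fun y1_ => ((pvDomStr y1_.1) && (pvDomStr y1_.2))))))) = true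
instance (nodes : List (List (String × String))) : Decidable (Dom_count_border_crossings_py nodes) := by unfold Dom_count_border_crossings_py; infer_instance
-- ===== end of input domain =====

-- B counts crossings by divide and conquer over the index interval of the extracted country list,
-- instead of A's linear adjacent-pair loop; objective: alternative.

-- ===== PORT A =====
-- nodes[i].get('country'): first-match association-list lookup
def pvGetCountry (d : List (String × String)) : Option String :=
  (d.find? (fun kv => kv.1 == "country")).map (·.2)

def count_border_crossings_py (nodes : List (List (String × String))) : Int :=
  if nodes.length < 2 then 0
  else
    (PySem.List.pyRange 0 ((nodes.length : Int) - 1) 1).foldl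
      (fun crossings i =>
        if pvGetCountry (PySem.List.pyGetD nodes i []) ≠
           pvGetCountry (PySem.List.pyGetD nodes (i + 1) []) then crossings + 1
        else crossings) 0

-- ===== PORT B =====
-- dc(lo, hi): crossings within cs[lo:hi], splitting at mid = (lo+hi)//2 (Nat division = Python // on nonnegatives)
def pvDC (cs : List (Option String)) (lo hi : Nat) : Int :=
  if hi - lo < 2 then 0
  else
    let mid := (lo + hi) / 2
    let boundary : Int := if cs.getD (mid - 1) none ≠ cs.getD mid none then 1 else 0
    pvDC cs lo mid + pvDC cs mid hi + boundary
termination_by hi - lo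
decreasing_by all_goals omega

def count_border_crossings_py_alt (nodes : List (List (String × String))) : Int :=
  let cs := nodes.map pvGetCountry
  pvDC cs 0 cs.length

-- ===== PRECONDITION & SPEC =====
def Spec_count_border_crossings_py (nodes : List (List (String × String))) (out : Int) : Prop := out = count_border_crossings_py_alt nodes
instance (nodes : List (List (String × String))) (out : Int) : Decidable (Spec_count_border_crossings_py nodes out) := by unfold Spec_count_border_crossings_py; infer_instance

-- ===== CLAIM (what is proved, stated in full; the proofs are below) =====
def Claim_equal_count_border_crossings_py : Prop := ∀ (nodes : List (List (String × String))), Dom_count_border_crossings_py nodes → Spec_count_border_crossings_py nodes (count_border_crossings_py nodes)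

-- ===== LEMMAS AND PROOFS =====

-- indicator of a crossing between positions k and k+1
def pvInd (cs : List (Option String)) (k : Nat) : Int :=
  if cs.getD k none ≠ cs.getD (k + 1) none then 1 else 0

-- divide and conquer equals the sum of indicators over the interval
lemma pvDC_eq_sum (cs : List (Option String)) (lo hi : Nat) :
    pvDC cs lo hi = ∑ k ∈ Finset.Ico lo (hi - 1), pvInd cs k := by
  induction lo, hi using pvDC.induct cs with
  | case1 lo hi h =>
    rw [pvDC]
    simp only [h, if_true]
    have : Finset.Ico lo (hi - 1) = ∅ := Finset.Ico_eq_empty (by omega)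
    simp [this]
  | case2 lo hi h mid ih1 ih2 =>
    rw [pvDC]
    simp only [h, if_false]
    have hmid : mid = (lo + hi) / 2 := rfl
    have h1 : lo ≤ mid - 1 := by omega
    have h2 : mid - 1 ≤ hi - 1 := by omega
    have h3 : mid - 1 < hi - 1 := by omega
    have hsplit : ∑ k ∈ Finset.Ico lo (mid - 1), pvInd cs k
        + ∑ k ∈ Finset.Ico (mid - 1) (hi - 1), pvInd cs k
        = ∑ k ∈ Finset.Ico lo (hi - 1), pvInd cs k :=
      Finset.sum_Ico_consecutive _ h1 h2
    have hbot : ∑ k ∈ Finset.Ico (mid - 1) (hi - 1), pvInd cs k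
        = pvInd cs (mid - 1) + ∑ k ∈ Finset.Ico (mid - 1 + 1) (hi - 1), pvInd cs k :=
      Finset.sum_eq_sum_Ico_succ_bot h3 _
    have hm1 : mid - 1 + 1 = mid := by omega
    rw [ih1, ih2, ← hsplit, hbot, hm1]
    simp only [pvInd, hm1]
    ring

-- A's foldl over range m equals the sum of indicators over range m
lemma pvFold_eq_sum (P : Nat → Prop) [DecidablePred P] (m : Nat) (acc : Int) :
    (List.range m).foldl (fun (c : Int) (k : Nat) => if P k then c + 1 else c) acc
      = acc + ∑ k ∈ Finset.range m, (if P k then (1 : Int) else 0) := by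
  induction m generalizing acc with
  | zero => simp
  | succ n ih =>
    rw [List.range_succ, List.foldl_append, List.foldl_cons, List.foldl_nil, ih,
        Finset.sum_range_succ]
    split_ifs <;> ring

lemma pvCastAdd (k : Nat) : ((k : Int) + 1) = (((k + 1 : Nat)) : Int) := by push_cast; ring

-- pyGetD-based indicator agrees with getD-based one for in-range indices
lemma pvInd_agree (nodes : List (List (String × String))) (k : Nat) (hk : k + 1 < nodes.length) :
    (if pvGetCountry (PySem.List.pyGetD nodes ((k : Int)) []) ≠
        pvGetCountry (PySem.List.pyGetD nodes ((k : Int) + 1) []) then (1 : Int) else 0)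
    = pvInd (nodes.map pvGetCountry) k := by
  have hk1 : k < nodes.length := by omega
  have e1 : (nodes.map pvGetCountry).getD k none
      = pvGetCountry (PySem.List.pyGetD nodes ((k : Int)) []) := by
    rw [PySem.List.pyGetD_natCast,
        List.getD_eq_getElem _ _ (by simpa using hk1),
        List.getD_eq_getElem _ _ hk1, List.getElem_map]
  have e2 : (nodes.map pvGetCountry).getD (k + 1) none
      = pvGetCountry (PySem.List.pyGetD nodes ((k : Int) + 1) []) := by
    rw [pvCastAdd, PySem.List.pyGetD_natCast,
        List.getD_eq_getElem _ _ (by simpa using hk),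
        List.getD_eq_getElem _ _ hk, List.getElem_map]
  simp only [pvInd, e1, e2]

-- ===== VERDICT (by name: the statement is the Claim_ definition above) =====
theorem count_border_crossings_py_spec : Claim_equal_count_border_crossings_py := by
  intro nodes _
  unfold Spec_count_border_crossings_py count_border_crossings_py count_border_crossings_py_alt
  simp only
  rw [pvDC_eq_sum]
  by_cases h : nodes.length < 2
  · simp only [h, if_true, List.length_map]
    have h0 : nodes.length - 1 = 0 := by omega
    simp [h0]
  · simp only [h, if_false]
    have hcast : ((nodes.length : Int) - 1) = (((nodes.length - 1 : Nat)) : Int) := by omega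
    rw [hcast, PySem.List.pyRange_zero_natCast, List.foldl_map]
    rw [pvFold_eq_sum (fun k => pvGetCountry (PySem.List.pyGetD nodes ((k : Int)) []) ≠
          pvGetCountry (PySem.List.pyGetD nodes ((k : Int) + 1) [])) (nodes.length - 1) 0]
    rw [zero_add, List.length_map, Finset.range_eq_Ico]
    apply Finset.sum_congr rfl
    intro k hk
    have hk' : k + 1 < nodes.length := by
      simp only [Finset.mem_Ico] at hk; omega
    exact pvInd_agree nodes k hk'
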